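-- pv_equiv track=rewrite | github.com/mxtdluffy/UNSW-CSE-COURSES | COMP9021/Assignment/Assignment1/Q2/superpower.py | get_max_power3
-- ===== SOURCE A (Python) =====
-- def get_max_power3(superpower, nb_of_switches):
--
--     max_power = 0
--     find_max_power = []
--     static_power = tuple(superpower)
--
--     for i in range(len(superpower)):
--         if i + nb_of_switches > len(superpower):
--             break
--         else:
--             cur_power = list(static_power)
--             for j in range(i, i + nb_of_switches):
--                 cur_power[j] *= -1
--             find_max_power.append(sum(cur_power))
--     max_power = max(find_max_power)
--
--     return max_power
-- ===== SOURCE B (Python) =====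
-- def get_max_power3(superpower, nb_of_switches):
--     total = sum(superpower)
--     k = nb_of_switches
--     if k <= 0:
--         # flipping an empty window leaves the array unchanged
--         return total
--     w = sum(superpower[:k])
--     m = w
--     for i in range(k, len(superpower)):
--         w += superpower[i] - superpower[i - k]
--         if w < m:
--             m = w
--     return total - 2 * m
-- ===== Notes on version B (the rewrite author's own statement) =====
-- stated objective: faster
-- what changed: Replaces the quadratic rebuild-flip-resum of every size-k window with one O(n) sliding-window pass that tracks the minimum window sum m and returns total - 2*m.
import Mathlib
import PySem

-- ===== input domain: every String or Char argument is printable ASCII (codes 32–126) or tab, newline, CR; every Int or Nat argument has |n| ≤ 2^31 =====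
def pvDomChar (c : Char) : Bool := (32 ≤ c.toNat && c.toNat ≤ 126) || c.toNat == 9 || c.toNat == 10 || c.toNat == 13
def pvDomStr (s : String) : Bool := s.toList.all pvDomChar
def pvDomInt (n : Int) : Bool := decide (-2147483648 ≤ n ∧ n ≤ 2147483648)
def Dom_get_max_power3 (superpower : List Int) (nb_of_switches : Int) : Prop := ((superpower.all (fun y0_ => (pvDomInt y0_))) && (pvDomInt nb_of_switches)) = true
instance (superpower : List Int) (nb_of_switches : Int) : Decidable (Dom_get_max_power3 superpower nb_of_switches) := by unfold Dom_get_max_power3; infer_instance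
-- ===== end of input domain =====

-- B replaces A's rebuild-flip-resum of every window by one sliding-window pass (objective: faster).

-- ===== PORT A =====
-- inner loop 'for j in range(i, i + nb_of_switches): cur_power[j] *= -1'
-- (t = number of iterations = max(0, nb_of_switches); on every executed path j is in range,
--  so List.set/getD is exact for the Python item assignment/read)
def pvNegSeg : List Int → Nat → Nat → List Int
  | cur, _, 0 => cur
  | cur, j, t+1 => pvNegSeg (cur.set j (-(cur.getD j 0))) (j+1) t

-- outer 'for i in range(len(superpower))' with the break
def pvAOuter (l : List Int) (k : Int) (i : Nat) (acc : List Int) : List Int :=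
  if i < l.length then
    if (i : Int) + k > (l.length : Int) then acc
    else pvAOuter l k (i+1) (acc ++ [(pvNegSeg l i k.toNat).sum])
  else acc
termination_by l.length - i

def get_max_power3 (superpower : List Int) (nb_of_switches : Int) : Int :=
  let find_max_power := pvAOuter superpower nb_of_switches 0 []
  -- max(find_max_power): raises ValueError on [], excluded by Pre_
  match PySem.List.max? find_max_power (fun y => y) with
  | some m => m
  | none => 0

-- ===== PORT B =====
def get_max_power3_alt (superpower : List Int) (nb_of_switches : Int) : Int :=
  let total := superpower.sum
  let k := nb_of_switches
  if k ≤ 0 then total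
  else
    let w0 := (PySem.List.slice superpower none (some k)).sum
    let p := (PySem.List.pyRange k (superpower.length : Int) 1).foldl
      (fun (p : Int × Int) i =>
        let w := p.1 + PySem.List.pyGetD superpower i 0 - PySem.List.pyGetD superpower (i - k) 0
        (w, if w < p.2 then w else p.2)) (w0, w0)
    total - 2 * p.2

-- ===== PRECONDITION & SPEC =====
-- A raises ValueError (max of an empty sequence) when no window fits: empty list, or
-- nb_of_switches > len(superpower); Pre_ excludes exactly those inputs.
def Pre_get_max_power3 (superpower : List Int) (nb_of_switches : Int) : Prop :=
  superpower ≠ [] ∧ nb_of_switches ≤ (superpower.length : Int)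
instance (superpower : List Int) (nb_of_switches : Int) : Decidable (Pre_get_max_power3 superpower nb_of_switches) := by unfold Pre_get_max_power3; infer_instance

def pvWitness_get_max_power3 : List Int × Int := ([3, -1, 4, -2], 2)

def Spec_get_max_power3 (superpower : List Int) (nb_of_switches : Int) (out : Int) : Prop := out = get_max_power3_alt superpower nb_of_switches
instance (superpower : List Int) (nb_of_switches : Int) (out : Int) : Decidable (Spec_get_max_power3 superpower nb_of_switches out) := by unfold Spec_get_max_power3; infer_instance

-- ===== CLAIM (what is proved, stated in full; the proofs are below) =====
def Claim_equal_get_max_power3 : Prop := ∀ (superpower : List Int) (nb_of_switches : Int), Dom_get_max_power3 superpower nb_of_switches → Pre_get_max_power3 superpower nb_of_switches → Spec_get_max_power3 superpower nb_of_switches (get_max_power3 superpower nb_of_switches)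

-- ===== LEMMAS AND PROOFS =====

-- window sum: the w elements starting at index s
def pvW (l : List Int) (w s : Nat) : Int := ((l.drop s).take w).sum

-- the running minimum B maintains: min of pvW over starts 0..c
def pvMinW (l : List Int) (w c : Nat) : Int :=
  ((List.range c).map (fun t => pvW l w (t+1))).foldl min (pvW l w 0)

theorem pv_sum_set (l : List Int) (j : Nat) (v : Int) (h : j < l.length) :
    (l.set j v).sum = l.sum - l.getD j 0 + v := by
  induction l generalizing j with
  | nil => simp at h
  | cons x xs ih =>
    cases j with
    | zero => simp [List.set]; ring
    | succ j =>
      simp only [List.set, List.sum_cons, List.getD_cons_succ]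
      rw [ih j (by simpa using h)]; ring

theorem pv_drop_set (l : List Int) (j : Nat) (v : Int) :
    (l.set j v).drop (j+1) = l.drop (j+1) := by
  induction l generalizing j with
  | nil => simp
  | cons x xs ih =>
    cases j with
    | zero => simp
    | succ j => simpa using ih j

theorem pv_negSeg_sum (t : Nat) : ∀ (l : List Int) (j : Nat), j + t ≤ l.length →
    (pvNegSeg l j t).sum = l.sum - 2 * ((l.drop j).take t).sum := by
  induction t with
  | zero => intro l j _; simp [pvNegSeg]
  | succ t ih =>
    intro l j h
    have hj : j < l.length := by omega
    rw [pvNegSeg]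
    rw [ih _ (j+1) (by simpa using (by omega : (j+1) + t ≤ l.length))]
    rw [pv_sum_set _ _ _ hj, pv_drop_set]
    have hdrop : l.drop j = l[j] :: l.drop (j+1) := List.drop_eq_getElem_cons hj
    rw [hdrop, List.take_succ_cons, List.sum_cons, List.getD_eq_getElem l 0 hj]
    ring

theorem pv_aouter_neg (l : List Int) (k : Int) (hk : k ≤ 0) :
    ∀ (d i : Nat) (acc : List Int), l.length - i ≤ d →
    pvAOuter l k i acc = acc ++ List.replicate (l.length - i) l.sum := by
  intro d
  induction d with
  | zero =>
    intro i acc hzz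
    rw [pvAOuter]
    have : ¬ i < l.length := by omega
    simp [this, show l.length - i = 0 by omega]
  | succ d ih =>
    intro i acc hd
    rw [pvAOuter]
    by_cases hi : i < l.length
    · have hg : ¬ ((i : Int) + k > (l.length : Int)) := by
        have : (i : Int) < (l.length : Int) := by exact_mod_cast hi
        omega
      simp only [hi, if_true, hg, if_false]
      rw [ih (i+1) _ (by omega)]
      have hk0 : k.toNat = 0 := Int.toNat_of_nonpos hk
      have hrep : l.length - i = (l.length - (i+1)) + 1 := by omega
      rw [hk0, hrep, List.replicate_succ]
      simp [pvNegSeg]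
    · simp [hi, show l.length - i = 0 by omega]

theorem pv_aouter_closed (l : List Int) (k : Int) (hk : 0 < k) (hkn : k ≤ (l.length : Int)) :
    ∀ (d i : Nat) (acc : List Int), l.length - i ≤ d →
    pvAOuter l k i acc = acc ++ (List.range (l.length - k.toNat + 1 - i)).map
      (fun t => l.sum - 2 * pvW l k.toNat (i + t)) := by
  have hk0 : (k.toNat : Int) = k := Int.toNat_of_nonneg (by omega)
  have hk01 : 1 ≤ k.toNat := by omega
  have hk0n : k.toNat ≤ l.length := by exact_mod_cast hk0 ▸ hkn
  intro d
  induction d with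
  | zero =>
    intro i acc hd
    rw [pvAOuter]
    have hi : ¬ i < l.length := by omega
    simp [hi, show l.length - k.toNat + 1 - i = 0 by omega]
  | succ d ih =>
    intro i acc hd
    rw [pvAOuter]
    by_cases hi : i < l.length
    · by_cases hw : i + k.toNat ≤ l.length
      · have hg : ¬ ((i : Int) + k > (l.length : Int)) := by
          rw [← hk0]; exact_mod_cast not_lt.mpr (by exact_mod_cast hw)
        simp only [hi, if_true, hg, if_false]
        rw [ih (i+1) _ (by omega)]
        rw [pv_negSeg_sum k.toNat l i hw]
        have hc : l.length - k.toNat + 1 - i = (l.length - k.toNat + 1 - (i+1)) + 1 := by omega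
        rw [hc, List.range_succ_eq_map, List.map_cons, List.map_map, List.append_assoc,
            List.singleton_append]
        refine congrArg (acc ++ ·) ?_
        refine List.cons_eq_cons.mpr ⟨by simp [pvW], ?_⟩
        apply List.map_congr_left
        intro t _
        simp only [Function.comp_apply, Nat.succ_eq_add_one]
        rw [show i + (t + 1) = i + 1 + t from by omega]
      · have hg : (i : Int) + k > (l.length : Int) := by
          rw [← hk0]; exact_mod_cast (by omega : (l.length : Nat) < i + k.toNat)
        simp [hi, hg, show l.length - k.toNat + 1 - i = 0 by omega]
    · simp [hi, show l.length - k.toNat + 1 - i = 0 by omega]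

theorem pv_slide (l : List Int) (w s : Nat) (h : s + w < l.length) :
    pvW l w (s+1) = pvW l w s + l.getD (s + w) 0 - l.getD s 0 := by
  cases w with
  | zero => simp [pvW]
  | succ w =>
    have hs : s < l.length := by omega
    have hsw : s + (w+1) < l.length + 1 := by omega
    have hdrop : l.drop s = l[s] :: l.drop (s+1) := List.drop_eq_getElem_cons hs
    have h1 : pvW l (w+1) s = l[s] + ((l.drop (s+1)).take w).sum := by
      rw [pvW, hdrop, List.take_succ_cons, List.sum_cons]
    have h2 : pvW l (w+1) (s+1) = ((l.drop (s+1)).take w).sum + l[s + (w+1)] := by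
      rw [pvW, List.take_add_one]
      have hlen : w < (l.drop (s+1)).length := by simp; omega
      rw [List.getElem?_eq_getElem hlen]
      simp only [Option.toList_some, List.sum_append, List.sum_cons, List.sum_nil]
      simp only [Int.add_zero]
      congr 1
      rw [List.getElem_drop]
      simp only [show s + 1 + w = s + (w + 1) from by omega]
    rw [h1, h2, List.getD_eq_getElem l 0 (by omega), List.getD_eq_getElem l 0 hs]
    ring

theorem pv_if_min (x m : Int) : (if x < m then x else m) = min m x := by
  rw [min_def]; split_ifs <;> omega

theorem pv_bfold (l : List Int) (k : Int) (k0 : Nat) (hk0 : (k0 : Int) = k) :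
    ∀ (c : Nat), c + k0 ≤ l.length →
    ((List.range c).map (fun t : Nat => k + (t : Int))).foldl
      (fun (p : Int × Int) (i : Int) =>
        (p.1 + PySem.List.pyGetD l i 0 - PySem.List.pyGetD l (i - k) 0,
         if p.1 + PySem.List.pyGetD l i 0 - PySem.List.pyGetD l (i - k) 0 < p.2
         then p.1 + PySem.List.pyGetD l i 0 - PySem.List.pyGetD l (i - k) 0 else p.2))
      (pvW l k0 0, pvW l k0 0)
    = (pvW l k0 c, pvMinW l k0 c) := by
  intro c
  induction c with
  | zero => intro _; simp [pvMinW]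
  | succ c ih =>
    intro h
    rw [List.range_succ, List.map_append, List.foldl_append, ih (by omega)]
    simp only [List.map_cons, List.map_nil, List.foldl_cons, List.foldl_nil]
    have eg1 : PySem.List.pyGetD l (k + (c : Int)) 0 = l.getD (k0 + c) 0 := by
      rw [show k + (c : Int) = ((k0 + c : Nat) : Int) from by push_cast [hk0]; ring,
          PySem.List.pyGetD_natCast]
    have eg2 : PySem.List.pyGetD l (k + (c : Int) - k) 0 = l.getD c 0 := by
      rw [show k + (c : Int) - k = ((c : Nat) : Int) from by ring, PySem.List.pyGetD_natCast]
    rw [eg1, eg2]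
    have hs : pvW l k0 c + l.getD (k0 + c) 0 - l.getD c 0 = pvW l k0 (c+1) := by
      rw [pv_slide l k0 c (by omega), Nat.add_comm c k0]
    rw [hs]
    have hmin : pvMinW l k0 (c+1) = min (pvMinW l k0 c) (pvW l k0 (c+1)) := by
      rw [pvMinW, List.range_succ, List.map_append, List.foldl_append]
      rfl
    rw [pv_if_min, hmin]

theorem pv_maxmin (T : Int) : ∀ (xs : List Int) (a : Int),
    (xs.map (fun w => T - 2 * w)).foldl max (T - 2 * a) = T - 2 * xs.foldl min a := by
  intro xs
  induction xs with
  | nil => intro a; simp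
  | cons x t ih =>
    intro a
    simp only [List.map_cons, List.foldl_cons]
    have : max (T - 2 * a) (T - 2 * x) = T - 2 * min a x := by
      rw [max_def, min_def]; split_ifs <;> omega
    rw [this, ih]

theorem pv_foldl_max_replicate (a : Int) (m : Nat) :
    (List.replicate m a).foldl max a = a := by
  induction m with
  | zero => simp
  | succ m ih => simpa [List.replicate_succ] using ih

-- ===== VERDICT (by name: the statement is the Claim_ definition above) =====
theorem get_max_power3_spec : Claim_equal_get_max_power3 := by
  intro l k _ hpre
  obtain ⟨hne, hkn⟩ := hpre
  have hn : 0 < l.length := List.length_pos_iff.mpr hne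
  unfold Spec_get_max_power3
  unfold get_max_power3 get_max_power3_alt
  by_cases hk : k ≤ 0
  · -- empty window: every element of find_max_power is the total sum
    simp only [if_pos hk]
    rw [pv_aouter_neg l k hk l.length 0 [] (by omega)]
    obtain ⟨m, hm⟩ : ∃ m, l.length - 0 = m + 1 := ⟨l.length - 1, by omega⟩
    rw [hm, List.replicate_succ]
    simp only [List.nil_append]
    rw [PySem.List.max?_id_cons, pv_foldl_max_replicate]
  · -- sliding window
    have hkpos : 0 < k := by omega
    have hk0 : (k.toNat : Int) = k := Int.toNat_of_nonneg (by omega)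
    have hk0n : k.toNat ≤ l.length := by exact_mod_cast hk0 ▸ hkn
    simp only [if_neg hk]
    set k0 := k.toNat with hk0def
    set c := l.length - k0 with hc
    -- A side: closed form of find_max_power
    rw [pv_aouter_closed l k hkpos hkn l.length 0 [] (by omega)]
    have hcount : l.length - k0 + 1 - 0 = c + 1 := by omega
    rw [hcount, List.range_succ_eq_map]
    simp only [List.nil_append, List.map_cons, List.map_map, Nat.add_zero]
    rw [PySem.List.max?_id_cons]
    have hmapA : (List.range c).map ((fun t => l.sum - 2 * pvW l k0 (0 + t)) ∘ Nat.succ)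
        = ((List.range c).map (fun t => pvW l k0 (t+1))).map (fun w => l.sum - 2 * w) := by
      rw [List.map_map]
      apply List.map_congr_left
      intro t _
      simp [Function.comp, Nat.succ_eq_add_one]
    rw [hmapA, pv_maxmin]
    -- B side
    have hslice : PySem.List.slice l none (some k) = l.take k0 := PySem.List.slice_to l (by omega)
    rw [hslice]
    have hw0 : (l.take k0).sum = pvW l k0 0 := by simp [pvW]
    rw [hw0]
    have hrange : PySem.List.pyRange k (l.length : Int) 1
        = (List.range c).map (fun t : Nat => k + (t : Int)) := by
      rw [PySem.List.pyRange_one]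
      have hce : ((l.length : Int) - k).toNat = c := by omega
      rw [hce]
    rw [hrange]
    rw [pv_bfold l k k0 hk0 c (by omega)]
    rfl
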